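-- pv_equiv track=rewrite | github.com/grairudolf/scholarsift | scraper.py | parse_funding_type
-- ===== SOURCE A (Python) =====
-- def parse_funding_type(text):
--     """Categorize funding types"""
--     text = text.lower()
--     if any(word in text for word in ['fully funded', 'full funding', '100%', 'complete']):
--         return 'fully_funded'
--     elif any(word in text for word in ['partial', '50%', 'half', 'tuition']):
--         return 'partial'
--     elif any(word in text for word in ['stipend', 'living allowance', 'monthly']):
--         return 'stipend'
--     return 'other'
-- ===== SOURCE B (Python) =====
-- # B: single left-to-right position scan of the text that matches all keywords at each
-- # offset and keeps the best (lowest) priority seen; the final priority indexes the label.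
-- def parse_funding_type(text):
--     t = text.lower()
--     keywords = [('fully funded', 0), ('full funding', 0), ('100%', 0), ('complete', 0),
--                 ('partial', 1), ('50%', 1), ('half', 1), ('tuition', 1),
--                 ('stipend', 2), ('living allowance', 2), ('monthly', 2)]
--     best = 3
--     for i in range(len(t) + 1):
--         for kw, rank in keywords:
--             if rank < best and t.startswith(kw, i):
--                 best = rank
--     return ('fully_funded', 'partial', 'stipend', 'other')[best]
-- ===== Notes on version B (the rewrite author's own statement) =====
-- stated objective: alternative
-- what changed: Instead of A's three prioritized any()-substring branches, B makes a single left-to-right scan over text positions, matching every keyword at each offset with startswith and keeping the minimum priority rank seen, then maps the final rank to its label; it trades A's early exit and fast substring search for one uniform position scan.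
import Mathlib
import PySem

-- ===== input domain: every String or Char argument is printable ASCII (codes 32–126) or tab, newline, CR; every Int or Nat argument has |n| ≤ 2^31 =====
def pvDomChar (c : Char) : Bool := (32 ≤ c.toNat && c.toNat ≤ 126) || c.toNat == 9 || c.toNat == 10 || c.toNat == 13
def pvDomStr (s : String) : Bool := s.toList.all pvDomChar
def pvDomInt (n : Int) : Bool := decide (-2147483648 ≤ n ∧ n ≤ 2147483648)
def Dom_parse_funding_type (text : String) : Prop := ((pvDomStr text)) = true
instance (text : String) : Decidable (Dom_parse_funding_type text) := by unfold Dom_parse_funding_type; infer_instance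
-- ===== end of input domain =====

-- B replaces A's three prioritized any()-substring branches by one left-to-right scan
-- over the text's positions, keeping the minimum matching rank (objective: alternative; same cost).

-- ===== PORT A =====
def parse_funding_type (text : String) : String :=
  let text := PySem.Str.lower text
  if ["fully funded", "full funding", "100%", "complete"].any (fun word => PySem.Str.isIn word text) then
    "fully_funded"
  else if ["partial", "50%", "half", "tuition"].any (fun word => PySem.Str.isIn word text) then
    "partial"
  else if ["stipend", "living allowance", "monthly"].any (fun word => PySem.Str.isIn word text) then
    "stipend"
  else
    "other"

-- ===== PORT B =====
def pvKeywords : List (List Char × Nat) :=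
  [("fully funded".toList, 0), ("full funding".toList, 0), ("100%".toList, 0), ("complete".toList, 0),
   ("partial".toList, 1), ("50%".toList, 1), ("half".toList, 1), ("tuition".toList, 1),
   ("stipend".toList, 2), ("living allowance".toList, 2), ("monthly".toList, 2)]

def parse_funding_type_alt (text : String) : String :=
  let t := (PySem.Str.lower text).toList
  -- for i in range(len(t)+1): for kw, rank in keywords: if rank < best and t.startswith(kw, i): best = rank
  -- (t.startswith(kw, i) with 0 ≤ i ≤ len(t) is exactly startswith on t[i:])
  let best := (List.range (t.length + 1)).foldl
    (fun best i => pvKeywords.foldl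
      (fun b p => if p.2 < b ∧ PySem.Chars.startswith (t.drop i) p.1 = true then p.2 else b) best) 3
  ["fully_funded", "partial", "stipend", "other"].getD best "other"

-- ===== PRECONDITION & SPEC =====
def Spec_parse_funding_type (text : String) (out : String) : Prop := out = parse_funding_type_alt text
instance (text : String) (out : String) : Decidable (Spec_parse_funding_type text out) := by unfold Spec_parse_funding_type; infer_instance

-- ===== CLAIM (what is proved, stated in full; the proofs are below) =====
def Claim_equal_parse_funding_type : Prop := ∀ (text : String), Dom_parse_funding_type text → Spec_parse_funding_type text (parse_funding_type text)

-- ===== LEMMAS AND PROOFS =====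

-- generic facts about the min-keeping fold  step b x = if f x < b ∧ P x then f x else b
theorem pv_fold_le_init {α : Type} (f : α → Nat) (P : α → Bool) :
    ∀ (xs : List α) (init : Nat),
      xs.foldl (fun b x => if f x < b ∧ P x = true then f x else b) init ≤ init := by
  intro xs
  induction xs with
  | nil => intro init; simp
  | cons y ys ih =>
    intro init
    simp only [List.foldl_cons]
    refine le_trans (ih _) ?_
    split <;> omega

theorem pv_fold_le_mem {α : Type} (f : α → Nat) (P : α → Bool) :
    ∀ (xs : List α) (init : Nat) (x : α), x ∈ xs → P x = true →
      xs.foldl (fun b x => if f x < b ∧ P x = true then f x else b) init ≤ f x := by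
  intro xs
  induction xs with
  | nil => intro _ x hx; simp at hx
  | cons y ys ih =>
    intro init x hx hP
    rcases List.mem_cons.mp hx with rfl | hx'
    · simp only [List.foldl_cons]
      refine le_trans (pv_fold_le_init f P ys _) ?_
      split_ifs with h
      · exact le_refl _
      · rcases Nat.lt_or_ge (f x) init with h' | h'
        · exact absurd ⟨h', hP⟩ h
        · exact h'
    · exact ih _ x hx' hP

theorem pv_fold_cases {α : Type} (f : α → Nat) (P : α → Bool) :
    ∀ (xs : List α) (init : Nat),
      xs.foldl (fun b x => if f x < b ∧ P x = true then f x else b) init = init ∨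
      ∃ x ∈ xs, P x = true ∧
        xs.foldl (fun b x => if f x < b ∧ P x = true then f x else b) init = f x := by
  intro xs
  induction xs with
  | nil => intro init; left; rfl
  | cons y ys ih =>
    intro init
    simp only [List.foldl_cons]
    rcases ih (if f y < init ∧ P y = true then f y else init) with h | ⟨x, hx, hP, hres⟩
    · by_cases hy : f y < init ∧ P y = true
      · right
        exact ⟨y, List.mem_cons_self .., hy.2, by rw [h, if_pos hy]⟩
      · left; rw [h, if_neg hy]
    · right; exact ⟨x, List.mem_cons_of_mem _ hx, hP, hres⟩

-- the nested loop of B as a flat fold over (position, keyword) pairs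
theorem pv_nested_eq_flat (t : List Char) (init : Nat) :
    (List.range (t.length + 1)).foldl
      (fun best i => pvKeywords.foldl
        (fun b p => if p.2 < b ∧ PySem.Chars.startswith (t.drop i) p.1 = true then p.2 else b) best) init
    = ((List.range (t.length + 1)).flatMap (fun i => pvKeywords.map (Prod.mk i))).foldl
        (fun b (x : Nat × (List Char × Nat)) =>
          if x.2.2 < b ∧ PySem.Chars.startswith (t.drop x.1) x.2.1 = true then x.2.2 else b) init := by
  rw [List.foldl_flatMap]
  simp only [List.foldl_map]

-- 'kw in t' for a nonempty kw is a startswith at some position ≤ len t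
theorem pv_isIn_iff_startswith (t kw : List Char) (hkw : kw ≠ []) :
    PySem.Chars.isIn kw t = true ↔ ∃ i < t.length + 1, PySem.Chars.startswith (t.drop i) kw = true := by
  constructor
  · intro h
    obtain ⟨j, hj⟩ := (PySem.Chars.exists_prefix_drop_iff_isIn kw t).mpr h
    rcases Nat.lt_or_ge j (t.length + 1) with hlt | hge
    · exact ⟨j, hlt, (PySem.Chars.startswith_iff _ _).mpr hj⟩
    · exfalso
      rw [List.drop_eq_nil_of_le (by omega)] at hj
      exact hkw (List.prefix_nil.mp hj)
  · rintro ⟨i, _, hsw⟩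
    exact (PySem.Chars.exists_prefix_drop_iff_isIn kw t).mp ⟨i, (PySem.Chars.startswith_iff _ _).mp hsw⟩

def pvBest (t : List Char) : Nat :=
  (List.range (t.length + 1)).foldl
    (fun best i => pvKeywords.foldl
      (fun b p => if p.2 < b ∧ PySem.Chars.startswith (t.drop i) p.1 = true then p.2 else b) best) 3

-- "some keyword of rank r occurs in t"
def pvM (t : List Char) (r : Nat) : Prop :=
  ∃ p ∈ pvKeywords, p.2 = r ∧ PySem.Chars.isIn p.1 t = true

theorem pv_best_le (t : List Char) (r : Nat) (h : pvM t r) : pvBest t ≤ r := by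
  obtain ⟨p, hp, hr, hin⟩ := h
  have hkw : p.1 ≠ [] := by
    have : pvKeywords.all (fun q => decide (q.1 ≠ [])) = true := by decide
    simpa using List.all_eq_true.mp this p hp
  obtain ⟨i, hi, hsw⟩ := (pv_isIn_iff_startswith t p.1 hkw).mp hin
  rw [pvBest, pv_nested_eq_flat]
  have hmem : (i, p) ∈ (List.range (t.length + 1)).flatMap (fun i => pvKeywords.map (Prod.mk i)) := by
    simp only [List.mem_flatMap, List.mem_map, List.mem_range]
    exact ⟨i, hi, p, hp, rfl⟩
  calc _ ≤ (i, p).2.2 :=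
        pv_fold_le_mem (fun x => x.2.2)
          (fun x => PySem.Chars.startswith (t.drop x.1) x.2.1) _ 3 (i, p) hmem hsw
    _ = r := hr

theorem pv_best_cases (t : List Char) :
    pvBest t = 3 ∨ ∃ r ≤ 2, pvM t r ∧ pvBest t = r := by
  rw [pvBest, pv_nested_eq_flat]
  rcases pv_fold_cases (fun x : Nat × (List Char × Nat) => x.2.2)
      (fun x => PySem.Chars.startswith (t.drop x.1) x.2.1)
      ((List.range (t.length + 1)).flatMap (fun i => pvKeywords.map (Prod.mk i))) 3 with h | ⟨x, hx, hP, hres⟩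
  · left; exact h
  · right
    simp only [List.mem_flatMap, List.mem_map, List.mem_range] at hx
    obtain ⟨i, hi, p, hp, hxeq⟩ := hx
    subst hxeq
    refine ⟨p.2, ?_, ?_, hres⟩
    · have : pvKeywords.all (fun q => decide (q.2 ≤ 2)) = true := by decide
      simpa using List.all_eq_true.mp this p hp
    · exact ⟨p, hp, rfl, (pv_isIn_iff_startswith t p.1 (by
        have : pvKeywords.all (fun q => decide (q.1 ≠ [])) = true := by decide
        simpa using List.all_eq_true.mp this p hp)).mpr ⟨i, hi, hP⟩⟩

-- A's three any() conditions in terms of pvM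
theorem pv_any0_iff (s : String) :
    (["fully funded", "full funding", "100%", "complete"].any
      (fun word => PySem.Str.isIn word s)) = true ↔ pvM s.toList 0 := by
  simp only [pvM, pvKeywords, List.any_eq_true, List.mem_cons, List.not_mem_nil, or_false,
    PySem.Str.isIn_eq]
  constructor
  · rintro ⟨w, hw, hin⟩
    rcases hw with rfl | rfl | rfl | rfl
    · exact ⟨("fully funded".toList, 0), Or.inl rfl, rfl, hin⟩
    · exact ⟨("full funding".toList, 0), Or.inr (Or.inl rfl), rfl, hin⟩
    · exact ⟨("100%".toList, 0), Or.inr (Or.inr (Or.inl rfl)), rfl, hin⟩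
    · exact ⟨("complete".toList, 0), Or.inr (Or.inr (Or.inr (Or.inl rfl))), rfl, hin⟩
  · rintro ⟨p, hp, hr, hin⟩
    rcases hp with rfl | rfl | rfl | rfl | rfl | rfl | rfl | rfl | rfl | rfl | rfl
    · exact ⟨"fully funded", Or.inl rfl, hin⟩
    · exact ⟨"full funding", Or.inr (Or.inl rfl), hin⟩
    · exact ⟨"100%", Or.inr (Or.inr (Or.inl rfl)), hin⟩
    · exact ⟨"complete", Or.inr (Or.inr (Or.inr (rfl))), hin⟩
    · norm_num at hr
    · norm_num at hr
    · norm_num at hr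
    · norm_num at hr
    · norm_num at hr
    · norm_num at hr
    · norm_num at hr

theorem pv_any1_iff (s : String) :
    (["partial", "50%", "half", "tuition"].any
      (fun word => PySem.Str.isIn word s)) = true ↔ pvM s.toList 1 := by
  simp only [pvM, pvKeywords, List.any_eq_true, List.mem_cons, List.not_mem_nil, or_false,
    PySem.Str.isIn_eq]
  constructor
  · rintro ⟨w, hw, hin⟩
    rcases hw with rfl | rfl | rfl | rfl
    · exact ⟨("partial".toList, 1), Or.inr (Or.inr (Or.inr (Or.inr (Or.inl rfl)))), rfl, hin⟩
    · exact ⟨("50%".toList, 1), Or.inr (Or.inr (Or.inr (Or.inr (Or.inr (Or.inl rfl))))), rfl, hin⟩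
    · exact ⟨("half".toList, 1), Or.inr (Or.inr (Or.inr (Or.inr (Or.inr (Or.inr (Or.inl rfl)))))), rfl, hin⟩
    · exact ⟨("tuition".toList, 1), Or.inr (Or.inr (Or.inr (Or.inr (Or.inr (Or.inr (Or.inr (Or.inl rfl))))))), rfl, hin⟩
  · rintro ⟨p, hp, hr, hin⟩
    rcases hp with rfl | rfl | rfl | rfl | rfl | rfl | rfl | rfl | rfl | rfl | rfl
    · norm_num at hr
    · norm_num at hr
    · norm_num at hr
    · norm_num at hr
    · exact ⟨"partial", Or.inl rfl, hin⟩
    · exact ⟨"50%", Or.inr (Or.inl rfl), hin⟩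
    · exact ⟨"half", Or.inr (Or.inr (Or.inl rfl)), hin⟩
    · exact ⟨"tuition", Or.inr (Or.inr (Or.inr (rfl))), hin⟩
    · norm_num at hr
    · norm_num at hr
    · norm_num at hr

theorem pv_any2_iff (s : String) :
    (["stipend", "living allowance", "monthly"].any
      (fun word => PySem.Str.isIn word s)) = true ↔ pvM s.toList 2 := by
  simp only [pvM, pvKeywords, List.any_eq_true, List.mem_cons, List.not_mem_nil, or_false,
    PySem.Str.isIn_eq]
  constructor
  · rintro ⟨w, hw, hin⟩
    rcases hw with rfl | rfl | rfl
    · exact ⟨("stipend".toList, 2), Or.inr (Or.inr (Or.inr (Or.inr (Or.inr (Or.inr (Or.inr (Or.inr (Or.inl rfl)))))))), rfl, hin⟩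
    · exact ⟨("living allowance".toList, 2), Or.inr (Or.inr (Or.inr (Or.inr (Or.inr (Or.inr (Or.inr (Or.inr (Or.inr (Or.inl rfl))))))))), rfl, hin⟩
    · exact ⟨("monthly".toList, 2), Or.inr (Or.inr (Or.inr (Or.inr (Or.inr (Or.inr (Or.inr (Or.inr (Or.inr (Or.inr (rfl)))))))))), rfl, hin⟩
  · rintro ⟨p, hp, hr, hin⟩
    rcases hp with rfl | rfl | rfl | rfl | rfl | rfl | rfl | rfl | rfl | rfl | rfl
    · norm_num at hr
    · norm_num at hr
    · norm_num at hr
    · norm_num at hr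
    · norm_num at hr
    · norm_num at hr
    · norm_num at hr
    · norm_num at hr
    · exact ⟨"stipend", Or.inl rfl, hin⟩
    · exact ⟨"living allowance", Or.inr (Or.inl rfl), hin⟩
    · exact ⟨"monthly", Or.inr (Or.inr (rfl)), hin⟩

-- ===== VERDICT (by name: the statement is the Claim_ definition above) =====
theorem parse_funding_type_spec : Claim_equal_parse_funding_type := by
  intro text _
  unfold Spec_parse_funding_type parse_funding_type parse_funding_type_alt
  set s := PySem.Str.lower text with hs
  have halt : (["fully_funded", "partial", "stipend", "other"] : List String).getD (pvBest s.toList) "other"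
      = ["fully_funded", "partial", "stipend", "other"].getD (pvBest s.toList) "other" := rfl
  show (if _ then _ else _) = _
  by_cases h0 : pvM s.toList 0
  · have hb : pvBest s.toList = 0 := Nat.le_zero.mp (pv_best_le _ _ h0)
    rw [if_pos ((pv_any0_iff s).mpr h0)]
    show _ = ["fully_funded", "partial", "stipend", "other"].getD (pvBest s.toList) "other"
    rw [hb]; rfl
  · rw [if_neg (fun hc => h0 ((pv_any0_iff s).mp hc))]
    by_cases h1 : pvM s.toList 1
    · have hle : pvBest s.toList ≤ 1 := pv_best_le _ _ h1
      have hb : pvBest s.toList = 1 := by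
        rcases pv_best_cases s.toList with h | ⟨r, hr2, hm, heq⟩
        · omega
        · interval_cases r
          · exact absurd hm h0
          · exact heq
          · omega
      rw [if_pos ((pv_any1_iff s).mpr h1)]
      show _ = ["fully_funded", "partial", "stipend", "other"].getD (pvBest s.toList) "other"
      rw [hb]; rfl
    · rw [if_neg (fun hc => h1 ((pv_any1_iff s).mp hc))]
      by_cases h2 : pvM s.toList 2
      · have hle : pvBest s.toList ≤ 2 := pv_best_le _ _ h2
        have hb : pvBest s.toList = 2 := by
          rcases pv_best_cases s.toList with h | ⟨r, hr2, hm, heq⟩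
          · omega
          · interval_cases r
            · exact absurd hm h0
            · exact absurd hm h1
            · exact heq
        rw [if_pos ((pv_any2_iff s).mpr h2)]
        show _ = ["fully_funded", "partial", "stipend", "other"].getD (pvBest s.toList) "other"
        rw [hb]; rfl
      · rw [if_neg (fun hc => h2 ((pv_any2_iff s).mp hc))]
        have hb : pvBest s.toList = 3 := by
          rcases pv_best_cases s.toList with h | ⟨r, hr2, hm, heq⟩
          · exact h
          · interval_cases r
            · exact absurd hm h0
            · exact absurd hm h1
            · exact absurd hm h2
        show _ = ["fully_funded", "partial", "stipend", "other"].getD (pvBest s.toList) "other"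
        rw [hb]; rfl
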